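-- pv_equiv track=rewrite | github.com/Zakria789/aiagentown | app/services/disposition_engine.py | _count_conversation_turns
-- ===== SOURCE A (Python) =====
-- def _count_conversation_turns(transcript: str) -> int:
--     """Count back-and-forth exchanges in conversation"""
--     if not transcript:
--         return 0
--
--     # Simple heuristic: count speaker changes
--     # Format: "Speaker: text"
--     lines = transcript.split('\n')
--     turns = 0
--     last_speaker = None
--
--     for line in lines:
--         if ':' in line:
--             speaker = line.split(':')[0].strip()
--             if speaker != last_speaker:
--                 turns += 1
--                 last_speaker = speaker
--
--     return turns
-- ===== SOURCE B (Python) =====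
-- def _count_conversation_turns(transcript: str) -> int:
--     """Count back-and-forth exchanges by complementary counting:
--     total speaker lines minus the number of adjacent equal-speaker pairs."""
--     speakers = [line.split(':')[0].strip()
--                 for line in transcript.split('\n') if ':' in line]
--     duplicates = sum(a == b for a, b in zip(speakers, speakers[1:]))
--     return len(speakers) - duplicates
-- ===== Notes on version B (the rewrite author's own statement) =====
-- stated objective: alternative
-- what changed: Replaces A's stateful change-counting scan (turns/last_speaker) by complementary counting: extract the speaker list, count adjacent equal-speaker pairs via zip, and return total minus duplicates.
import Mathlib
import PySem

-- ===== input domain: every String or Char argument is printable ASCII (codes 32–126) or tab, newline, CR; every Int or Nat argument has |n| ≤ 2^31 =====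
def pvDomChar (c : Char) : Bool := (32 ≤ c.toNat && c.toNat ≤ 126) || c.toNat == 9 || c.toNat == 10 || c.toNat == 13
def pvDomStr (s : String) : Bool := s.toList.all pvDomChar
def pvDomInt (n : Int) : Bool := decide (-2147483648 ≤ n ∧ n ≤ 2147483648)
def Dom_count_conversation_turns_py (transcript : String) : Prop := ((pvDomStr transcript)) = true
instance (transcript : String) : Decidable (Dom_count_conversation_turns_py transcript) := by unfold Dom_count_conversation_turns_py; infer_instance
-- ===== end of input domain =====

-- B replaces A's stateful change-counting scan by complementary counting:
-- extract the speaker list, count adjacent equal-speaker pairs, return total minus duplicates.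

-- ===== PORT A =====
-- line.split(':')[0].strip(): split with a non-empty separator never fails and never
-- returns an empty list, so (split? · ":").getD [] and .headD "" are exact here.
def pvSpeaker (line : String) : String :=
  PySem.Str.strip (((PySem.Str.split? line ":").getD []).headD "")

-- the body of A's for-loop, on state (turns, last_speaker)
def pvStepA (st : Int × Option String) (line : String) : Int × Option String :=
  if PySem.Str.isIn ":" line then
    if st.2 ≠ some (pvSpeaker line) then (st.1 + 1, some (pvSpeaker line)) else st
  else st

def count_conversation_turns_py (transcript : String) : Int :=
  if transcript = "" then 0
  else
    (((PySem.Str.split? transcript "\n").getD []).foldl pvStepA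
      ((0 : Int), (none : Option String))).1

-- ===== PORT B =====
-- the comprehension [line.split(':')[0].strip() for line in lines if ':' in line]
def pvSpeakers : List String → List String
  | [] => []
  | l :: ls => if PySem.Str.isIn ":" l then pvSpeaker l :: pvSpeakers ls else pvSpeakers ls

def count_conversation_turns_py_alt (transcript : String) : Int :=
  let speakers := pvSpeakers ((PySem.Str.split? transcript "\n").getD [])
  -- duplicates = sum(a == b for a, b in zip(speakers, speakers[1:]))
  let duplicates :=
    (speakers.zip speakers.tail).foldl
      (fun acc p => acc + (if p.1 = p.2 then (1 : Int) else 0)) 0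
  (speakers.length : Int) - duplicates

-- ===== PRECONDITION & SPEC =====
def Spec_count_conversation_turns_py (transcript : String) (out : Int) : Prop := out = count_conversation_turns_py_alt transcript
instance (transcript : String) (out : Int) : Decidable (Spec_count_conversation_turns_py transcript out) := by unfold Spec_count_conversation_turns_py; infer_instance

-- ===== CLAIM (what is proved, stated in full; the proofs are below) =====
def Claim_equal_count_conversation_turns_py : Prop := ∀ (transcript : String), Dom_count_conversation_turns_py transcript → Spec_count_conversation_turns_py transcript (count_conversation_turns_py transcript)

-- ===== LEMMAS AND PROOFS =====

-- number of adjacent equal pairs starting from a previous element (proof-only helper)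
def pvEqFrom : String → List String → Int
  | _, [] => 0
  | p, y :: ys => (if p = y then 1 else 0) + pvEqFrom y ys

-- B's zip-fold computes pvEqFrom
lemma pvZipFold (xs : List String) : ∀ (x : String) (a : Int),
    ((x :: xs).zip xs).foldl (fun acc p => acc + (if p.1 = p.2 then (1 : Int) else 0)) a
      = a + pvEqFrom x xs := by
  induction xs with
  | nil => intro x a; simp [pvEqFrom]
  | cons y ys ih => intro x a; simp only [List.zip_cons_cons, List.foldl_cons, pvEqFrom, ih]; ring

-- A's loop count, read off as count minus adjacent duplicates
def pvTail : Option String → List String → Int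
  | none, sp => (sp.length : Int) - (match sp with | [] => 0 | x :: xs => pvEqFrom x xs)
  | some p, sp => (sp.length : Int) - pvEqFrom p sp

lemma pvLoopA (lines : List String) : ∀ (t : Int) (last : Option String),
    (lines.foldl pvStepA (t, last)).1 = t + pvTail last (pvSpeakers lines) := by
  induction lines with
  | nil => intro t last; cases last <;> simp [pvTail, pvEqFrom, pvSpeakers]
  | cons l ls ih =>
    intro t last
    rw [List.foldl_cons]
    by_cases hc : PySem.Str.isIn ":" l = true
    · have hs : pvSpeakers (l :: ls) = pvSpeaker l :: pvSpeakers ls := by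
        simp only [pvSpeakers]; rw [if_pos hc]
    
      cases last with
      | none =>
        have hstep : pvStepA (t, none) l = (t + 1, some (pvSpeaker l)) := by
          simp only [pvStepA]; rw [if_pos hc]; simp
        rw [hstep, ih, hs]
        simp only [pvTail, List.length_cons]
        push_cast; ring
      | some p =>
        by_cases he : pvSpeaker l = p
        · have hstep : pvStepA (t, some p) l = (t, some p) := by
            simp only [pvStepA]; rw [if_pos hc]; simp [he]
          rw [hstep, ih, hs]
          simp only [pvTail, pvEqFrom, List.length_cons, he, if_true]
          push_cast; ring
        · have hstep : pvStepA (t, some p) l = (t + 1, some (pvSpeaker l)) := by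
            simp only [pvStepA]; rw [if_pos hc]; simp [Ne.symm he]
          rw [hstep, ih, hs]
          simp only [pvTail, pvEqFrom, List.length_cons]
          rw [if_neg (fun h => he h.symm)]
          push_cast; ring
    · have hs : pvSpeakers (l :: ls) = pvSpeakers ls := by
        simp only [pvSpeakers]; rw [if_neg hc]
      have hstep : pvStepA (t, last) l = (t, last) := by
        simp only [pvStepA]; rw [if_neg hc]
      rw [hstep, ih, hs]

-- B written through pvTail
lemma pvAltEq (transcript : String) :
    count_conversation_turns_py_alt transcript
      = pvTail none (pvSpeakers ((PySem.Str.split? transcript "\n").getD [])) := by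
  unfold count_conversation_turns_py_alt
  cases h : pvSpeakers ((PySem.Str.split? transcript "\n").getD []) with
  | nil => simp [pvTail]
  | cons x xs => simp only [pvTail, List.tail_cons, pvZipFold, zero_add]

theorem count_conversation_turns_py_spec : Claim_equal_count_conversation_turns_py := by
  intro transcript _
  unfold Spec_count_conversation_turns_py
  unfold count_conversation_turns_py
  by_cases h : transcript = ""
  · subst h; rw [if_pos rfl]; rw [pvAltEq]; decide
  · rw [if_neg h, pvLoopA, pvAltEq, zero_add]
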